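-- pv_equiv track=rewrite | github.com/tofulim/algorithm_study | algorithm/programers/slicingn^2array.py | bfs
-- ===== SOURCE A (Python) =====
-- x=[0,1,1] # 우, 하 ,아래대각만 보면 되므로 3개
--
-- y=[1,0,1]
--
-- def bfs(arr,visit,n):
--     queue=[(0,0,1)]
--     visit[0][0]=True
--     cnt_num=1 #초기 숫자1
--     arr[0][0]=1
--     while queue:
--         i,j,cnt_num=queue.pop()
--         cnt_num+=1 #다음 숫자로 증가시킴
--         for k in range(3): #우, 하 ,아래대각 순회하며 조건 맞는지 검사
--             newi=i+y[k]
--             newj=j+x[k]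
--             if newi>=n or newj>=n or visit[newi][newj]:
--                 continue
--             visit[newi][newj]=True
--             queue.append((newi,newj,cnt_num)) #한칸 증가시킨다
--             arr[newi][newj]=cnt_num #해당 증가한 값을 배열에 기록
--
--     oned_arr=[]
--     for a in arr: #1차원 배열로 결합
--         oned_arr.extend(a)
--     return oned_arr
-- ===== SOURCE B (Python) =====
-- # B: closed form. A's diagonal-first DFS fills every cell (i,j) of the fresh n x n
-- # region with max(i,j)+1; B writes that value directly (keeping A's leading
-- # visit[0][0]/arr[0][0] writes and its in-place marking of the n x n region), then
-- # returns the flattened arr, so row tails and extra rows are kept as they are.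
-- def bfs(arr, visit, n):
--     visit[0][0] = True
--     arr[0][0] = 1
--     for i in range(n):
--         row, vrow = arr[i], visit[i]
--         for j in range(n):
--             row[j] = max(i, j) + 1
--             vrow[j] = True
--     out = []
--     for row in arr:
--         out.extend(row)
--     return out
-- ===== Notes on version B (the rewrite author's own statement) =====
-- stated objective: simpler
-- what changed: Replaces the stack-based DFS (queue of triples, visited bookkeeping, final flatten) by a direct row-major fill with the closed form max(i,j)+1 (same leading origin writes and in-place region marking); Pre_ keeps the natural call shape and excludes undersized grids (A raises IndexError) and pre-set True cells inside an n>=2 region, where A's values are artefacts of its LIFO pop order.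
-- outside the precondition, e.g. on bfs([[3, 3], [2, 3]], [[False, True], [True, True]], 5): A returns [1, 3, 2, 3], B raises IndexError
import Mathlib
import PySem

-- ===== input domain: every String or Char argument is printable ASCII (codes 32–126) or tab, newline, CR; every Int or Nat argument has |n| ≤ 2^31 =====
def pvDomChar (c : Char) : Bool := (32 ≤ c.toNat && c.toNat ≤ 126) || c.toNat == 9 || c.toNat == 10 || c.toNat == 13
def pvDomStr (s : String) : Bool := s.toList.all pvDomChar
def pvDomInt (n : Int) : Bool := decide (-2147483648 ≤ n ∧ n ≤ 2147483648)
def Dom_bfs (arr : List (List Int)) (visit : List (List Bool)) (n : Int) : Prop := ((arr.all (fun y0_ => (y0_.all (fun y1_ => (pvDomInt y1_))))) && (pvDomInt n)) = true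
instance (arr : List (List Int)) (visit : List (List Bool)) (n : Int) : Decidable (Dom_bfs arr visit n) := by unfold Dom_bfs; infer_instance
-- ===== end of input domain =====

-- B replaces A's stack-based DFS fill by a direct row-major fill with the closed form
-- max(i,j)+1 (objective: simpler); B performs the same in-place writes to arr/visit as A
-- on the inputs admitted by Pre_. The equivalence proved here is about the return value.

-- ===== PORT A =====
-- module constants x=[0,1,1], y=[1,0,1]
def xA : List Int := [0, 1, 1]
def yA : List Int := [1, 0, 1]

-- m[i][j] (read); none exactly where Python raises IndexError
def getCell? {α : Type} (m : List (List α)) (i j : Int) : Option α :=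
  match PySem.List.pyGet? m i with
  | none => none
  | some row => PySem.List.pyGet? row j

-- m[i][j] = x (write); none exactly where Python raises IndexError.
-- Position normalised like Python (negative index counts from the end).
def setCell? {α : Type} (m : List (List α)) (i j : Int) (x : α) : Option (List (List α)) :=
  match PySem.List.pyGet? m i with
  | none => none
  | some row =>
    match PySem.List.pyGet? row j with
    | none => none
    | some _ =>
      let ni : Nat := (if i < 0 then i + (m.length : Int) else i).toNat
      let nj : Nat := (if j < 0 then j + (row.length : Int) else j).toNat
      some (m.set ni (row.set nj x))

-- one neighbour check of the `for k in range(3)` body (after looking up y[k], x[k]);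
-- `continue` = returning the state unchanged; none = Python raised
def visitTry (n i j cnt dy dx : Int)
    (st : List (Int × Int × Int) × List (List Bool) × List (List Int)) :
    Option (List (Int × Int × Int) × List (List Bool) × List (List Int)) :=
  let (q, v, a) := st
  let newi := i + dy
  let newj := j + dx
  if newi ≥ n ∨ newj ≥ n then some st
  else
    match getCell? v newi newj with
    | none => none
    | some true => some st
    | some false =>
      match setCell? v newi newj true with
      | none => none
      | some v' =>
        match setCell? a newi newj cnt with
        | none => none
        | some a' => some ((newi, newj, cnt) :: q, v', a')

-- the `while queue:` loop; the stack top is the HEAD of the list (Python appends at the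
-- right and pops from the right — same stack, same order). fuel is a totality guard only:
-- each push marks a fresh in-range cell of visit True, so a run that does not raise pops
-- at most n*n times, and the fuel n*n+1 supplied by `bfs` can never run out.
def bfsLoop (n : Int) : Nat → List (Int × Int × Int) → List (List Bool) → List (List Int) →
    Option (List (List Int))
  | _, [], _, a => some a
  | 0, _ :: _, _, _ => none
  | f + 1, (i, j, cnt) :: rest, v, a =>
    match (PySem.List.pyRange 0 3 1).foldl
        (fun acc k =>
          acc.bind fun st =>
            match PySem.List.pyGet? yA k, PySem.List.pyGet? xA k with
            | some dy, some dx => visitTry n i j (cnt + 1) dy dx st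
            | _, _ => none)
        (some (rest, v, a)) with
    | none => none
    | some (q', v', a') => bfsLoop n f q' v' a'

def bfs (arr : List (List Int)) (visit : List (List Bool)) (n : Int) : List Int :=
  match setCell? visit 0 0 true with
  | none => []  -- Python raises IndexError here (excluded by Pre_)
  | some v1 =>
    match setCell? arr 0 0 1 with
    | none => []  -- Python raises (excluded by Pre_)
    | some a1 =>
      match bfsLoop n (n.toNat * n.toNat + 1) [(0, 0, 1)] v1 a1 with
      | none => []  -- Python raises (excluded by Pre_)
      | some a' => a'.foldl (fun out row => out ++ row) []  -- oned_arr.extend(a)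

-- ===== PORT B =====
-- one body step of B's inner loop: row[j] = max(i,j)+1; vrow[j] = True
-- (none exactly where the Python assignment raises IndexError)
def fillCell (st : Option (List (List Int) × List (List Bool))) (i j : Int) :
    Option (List (List Int) × List (List Bool)) :=
  st.bind fun va =>
    match setCell? va.1 i j (max i j + 1) with
    | none => none
    | some a' =>
      match setCell? va.2 i j true with
      | none => none
      | some v' => some (a', v')

def bfs_alt (arr : List (List Int)) (visit : List (List Bool)) (n : Int) : List Int :=
  match setCell? visit 0 0 true with
  | none => []  -- Python raises IndexError here (excluded by Pre_)
  | some v0 =>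
    match setCell? arr 0 0 1 with
    | none => []  -- Python raises (excluded by Pre_)
    | some a0 =>
      match (PySem.List.pyRange 0 n 1).foldl
          (fun st i => (PySem.List.pyRange 0 n 1).foldl (fun st2 j => fillCell st2 i j) st)
          (some (a0, v0)) with
      | none => []
      | some (a1, _) => a1.foldl (fun out row => out ++ row) []  -- out.extend(row)

-- ===== PRECONDITION & SPEC =====
-- Pre_ is the problem's natural call shape: both grids reach cell (0,0), and when
-- n ≥ 2 the first n rows of both grids have length ≥ n with the n×n region of visit
-- all False. It excludes (a) undersized grids, on which A raises IndexError, and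
-- (b) grids with pre-set True cells inside an n×n (n ≥ 2) region, on which the values
-- A fills and the cells it skips are artefacts of its LIFO pop order.
def Pre_bfs (arr : List (List Int)) (visit : List (List Bool)) (n : Int) : Prop :=
  0 < visit.length ∧ 0 < (visit.getD 0 []).length ∧
  0 < arr.length ∧ 0 < (arr.getD 0 []).length ∧
  (2 ≤ n →
    n ≤ (arr.length : Int) ∧ n ≤ (visit.length : Int) ∧
    (∀ i : Nat, i < n.toNat → n ≤ ((arr.getD i []).length : Int)) ∧
    (∀ i : Nat, i < n.toNat → n ≤ ((visit.getD i []).length : Int) ∧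
      ∀ j : Nat, j < n.toNat → (visit.getD i []).getD j true = false))

instance (arr : List (List Int)) (visit : List (List Bool)) (n : Int) :
    Decidable (Pre_bfs arr visit n) := by unfold Pre_bfs; infer_instance

def pvWitness_bfs : List (List Int) × List (List Bool) × Int :=
  ([[0, 0], [0, 0]], [[false, false], [false, false]], 2)

def Spec_bfs (arr : List (List Int)) (visit : List (List Bool)) (n : Int) (out : List Int) : Prop := out = bfs_alt arr visit n
instance (arr : List (List Int)) (visit : List (List Bool)) (n : Int) (out : List Int) : Decidable (Spec_bfs arr visit n out) := by unfold Spec_bfs; infer_instance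

-- ===== CLAIM (what is proved, stated in full; the proofs are below) =====
def Claim_equal_bfs : Prop := ∀ (arr : List (List Int)) (visit : List (List Bool)) (n : Int), Dom_bfs arr visit n → Pre_bfs arr visit n → Spec_bfs arr visit n (bfs arr visit n)

-- ===== LEMMAS AND PROOFS =====

-- ---- the DFS trace: configurations the loop passes through on a fresh grid ----

-- the settled part of the stack below the current sweep
def sideS : Nat → List (Int × Int × Int)
  | 0 => []
  | k + 1 => ((k : Int), (k : Int) + 1, (k : Int) + 2) ::
             ((k : Int) + 1, (k : Int), (k : Int) + 2) :: sideS k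

inductive Cfg : Type
  | diag (d : Nat)
  | row (k j : Nat)
  | col (k i : Nat)

def queueOf : Cfg → List (Int × Int × Int)
  | .diag d => ((d : Int), (d : Int), (d : Int) + 1) :: sideS d
  | .row k j => ((k : Int), (j : Int), (j : Int) + 1) ::
                ((k : Int) + 1, (k : Int), (k : Int) + 2) :: sideS k
  | .col k i => ((i : Int), (k : Int), (i : Int) + 1) :: sideS k

def WfC (N : Nat) : Cfg → Prop
  | .diag d => d < N
  | .row k j => k + 1 < N ∧ k + 1 ≤ j ∧ j < N
  | .col k i => k + 1 < N ∧ k + 1 ≤ i ∧ i < N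

-- visited set at each configuration
def VOf : Cfg → Nat → Nat → Bool
  | .diag d, r, c => decide ((r ≤ c + 1 ∧ c ≤ r + 1) ∧ r ≤ d ∧ c ≤ d)
  | .row k j, r, c => decide ((r ≤ c + 1 ∧ c ≤ r + 1) ∨ (k + 1 ≤ r ∧ k + 1 ≤ c) ∨
      (r = k ∧ k ≤ c ∧ c ≤ j))
  | .col k i, r, c => decide ((r ≤ c + 1 ∧ c ≤ r + 1) ∨ (k + 1 ≤ r ∧ k + 1 ≤ c) ∨
      (r = k ∧ k ≤ c) ∨ (c = k ∧ k ≤ r ∧ r ≤ i))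

-- number of pops still to come
def remOf (N : Nat) : Cfg → Nat
  | .diag d => N * N - d
  | .row k j => (N - j) + (N - 1 - k) + k * (2 * N - k - 1)
  | .col k i => (N - i) + k * (2 * N - k - 1)

def updV (V : Nat → Nat → Bool) (r c : Nat) : Nat → Nat → Bool :=
  fun r' c' => if r' = r ∧ c' = c then true else V r' c'

def VisOk (visit₀ : List (List Bool)) (N : Nat) (v : List (List Bool))
    (V : Nat → Nat → Bool) : Prop :=
  v.length = visit₀.length ∧
  (∀ r : Nat, (v.getD r []).length = (visit₀.getD r []).length) ∧
  (∀ r c : Nat, r < N → c < N → (v.getD r [])[c]? = some (V r c))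

def ArrOk (arr₀ : List (List Int)) (N : Nat) (a : List (List Int))
    (V : Nat → Nat → Bool) : Prop :=
  a.length = arr₀.length ∧
  (∀ r : Nat, (a.getD r []).length = (arr₀.getD r []).length) ∧
  (∀ r c : Nat, (a.getD r [])[c]? =
    if r < N ∧ c < N ∧ V r c = true then some (((max r c : Nat) : Int) + 1)
    else (arr₀.getD r [])[c]?)

-- shape facts drawn from Pre_
def Shapes (arr₀ : List (List Int)) (visit₀ : List (List Bool)) (N : Nat) : Prop :=
  N ≤ arr₀.length ∧ N ≤ visit₀.length ∧
  (∀ r : Nat, r < N → N ≤ (arr₀.getD r []).length ∧ N ≤ (visit₀.getD r []).length)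

-- ---- small access lemmas ----

theorem getCell?_eq {α : Type} (m : List (List α)) (r c : Nat) (hr : r < m.length) :
    getCell? m (r : Int) (c : Int) = (m.getD r [])[c]? := by
  simp [getCell?, PySem.List.pyGet?_natCast, List.getElem?_eq_getElem hr,
    List.getD_eq_getElem m [] hr]

theorem setCell?_eq {α : Type} (m : List (List α)) (r c : Nat) (x : α)
    (hr : r < m.length) (hc : c < (m.getD r []).length) :
    setCell? m (r : Int) (c : Int) x = some (m.set r ((m.getD r []).set c x)) := by
  rw [List.getD_eq_getElem m [] hr] at hc ⊢
  simp [setCell?, PySem.List.pyGet?_natCast, List.getElem?_eq_getElem hr,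
    List.getElem?_eq_getElem hc]
  rw [if_neg (by omega : ¬ ((r : Int) < 0)), if_neg (by omega : ¬ ((c : Int) < 0))]
  simp

theorem set_getD_getElem? {α : Type} (m : List (List α)) (r c : Nat) (x : α)
    (hr : r < m.length) (hc : c < (m.getD r []).length) (r' c' : Nat) :
    ((m.set r ((m.getD r []).set c x)).getD r' [])[c']? =
      if r' = r ∧ c' = c then some x else (m.getD r' [])[c']? := by
  by_cases h : r' = r
  · subst h
    rw [List.getD_eq_getElem _ _ (by simpa using hr), List.getElem_set_self,
      List.getD_eq_getElem m [] hr] at *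
    by_cases h2 : c' = c
    · subst h2; simp [List.getElem?_set_self, hc]
    · simp [List.getElem?_set_ne (by omega : c ≠ c'), h2]
  · simp only [h, false_and, if_neg, not_false_iff]
    by_cases hr' : r' < m.length
    · rw [List.getD_eq_getElem _ _ (by simpa using hr'),
        List.getElem_set_ne (by omega : r ≠ r'), List.getD_eq_getElem m [] hr']
    · rw [List.getD_eq_default _ _ (by simpa using hr'), List.getD_eq_default _ _ (by omega)]

theorem set_getD_length {α : Type} (m : List (List α)) (r c : Nat) (x : α)
    (hr : r < m.length) (hc : c < (m.getD r []).length) (r' : Nat) :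
    (((m.set r ((m.getD r []).set c x)).getD r' [])).length = ((m.getD r' [])).length := by
  by_cases h : r' = r
  · subst h
    rw [List.getD_eq_getElem _ _ (by simpa using hr), List.getElem_set_self,
      List.getD_eq_getElem m [] hr]
    simp
  · by_cases hr' : r' < m.length
    · rw [List.getD_eq_getElem _ _ (by simpa using hr'),
        List.getElem_set_ne (by omega : r ≠ r'), List.getD_eq_getElem m [] hr']
    · rw [List.getD_eq_default _ _ (by simpa using hr'), List.getD_eq_default _ _ (by omega)]

-- ---- state-update lemmas ----

theorem visOk_congr {visit₀ : List (List Bool)} {N : Nat} {v : List (List Bool)}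
    {V V' : Nat → Nat → Bool} (h : VisOk visit₀ N v V)
    (hVV : ∀ r c : Nat, r < N → c < N → V r c = V' r c) : VisOk visit₀ N v V' := by
  refine ⟨h.1, h.2.1, fun r c hr hc => ?_⟩
  rw [h.2.2 r c hr hc, hVV r c hr hc]

theorem arrOk_congr {arr₀ : List (List Int)} {N : Nat} {a : List (List Int)}
    {V V' : Nat → Nat → Bool} (h : ArrOk arr₀ N a V)
    (hVV : ∀ r c : Nat, r < N → c < N → V r c = V' r c) : ArrOk arr₀ N a V' := by
  refine ⟨h.1, h.2.1, fun r c => ?_⟩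
  rw [h.2.2 r c]
  by_cases hr : r < N
  · by_cases hc : c < N
    · rw [hVV r c hr hc]
    · simp [hc]
  · simp [hr]

theorem visOk_push {visit₀ : List (List Bool)} {N : Nat} {v : List (List Bool)}
    {V : Nat → Nat → Bool} (h : VisOk visit₀ N v V) (r c : Nat)
    (hr : r < N) (hc : c < N)
    (hlen : N ≤ visit₀.length) (hrow : N ≤ (visit₀.getD r []).length) :
    setCell? v (r : Int) (c : Int) true = some (v.set r ((v.getD r []).set c true)) ∧
    VisOk visit₀ N (v.set r ((v.getD r []).set c true)) (updV V r c) := by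
  have hrv : r < v.length := by have := h.1; omega
  have hcv : c < (v.getD r []).length := by rw [h.2.1 r]; omega
  refine ⟨setCell?_eq v r c true hrv hcv, ?_, fun r' => ?_, fun r' c' hr' hc' => ?_⟩
  · simpa using h.1
  · rw [set_getD_length v r c true hrv hcv]; exact h.2.1 r'
  · rw [set_getD_getElem? v r c true hrv hcv]
    unfold updV
    by_cases hx : r' = r ∧ c' = c
    · simp [hx]
    · simp only [hx, if_false]
      exact h.2.2 r' c' hr' hc'

theorem arrOk_push {arr₀ : List (List Int)} {N : Nat} {a : List (List Int)}
    {V : Nat → Nat → Bool} (h : ArrOk arr₀ N a V) (r c : Nat) (x : Int)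
    (hr : r < N) (hc : c < N)
    (hlen : N ≤ arr₀.length) (hrow : N ≤ (arr₀.getD r []).length)
    (hx : x = ((max r c : Nat) : Int) + 1) :
    setCell? a (r : Int) (c : Int) x = some (a.set r ((a.getD r []).set c x)) ∧
    ArrOk arr₀ N (a.set r ((a.getD r []).set c x)) (updV V r c) := by
  have hrv : r < a.length := by have := h.1; omega
  have hcv : c < (a.getD r []).length := by rw [h.2.1 r]; omega
  refine ⟨setCell?_eq a r c x hrv hcv, ?_, fun r' => ?_, fun r' c' => ?_⟩
  · simpa using h.1
  · rw [set_getD_length a r c x hrv hcv]; exact h.2.1 r'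
  · rw [set_getD_getElem? a r c x hrv hcv]
    unfold updV
    by_cases hxx : r' = r ∧ c' = c
    · obtain ⟨rfl, rfl⟩ := hxx
      simp [hr, hc, hx]
    · simp only [hxx, if_false]
      rw [h.2.2 r' c']

-- ---- evaluating one neighbour try ----

theorem visitTry_oob {n i j cnt dy dx : Int}
    {st : List (Int × Int × Int) × List (List Bool) × List (List Int)}
    (h : i + dy ≥ n ∨ j + dx ≥ n) : visitTry n i j cnt dy dx st = some st := by
  obtain ⟨q, v, a⟩ := st
  simp [visitTry, h]

theorem visitTry_vis {n i j cnt dy dx : Int}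
    {q : List (Int × Int × Int)} {v : List (List Bool)} {a : List (List Int)}
    (h : ¬(i + dy ≥ n ∨ j + dx ≥ n)) (hv : getCell? v (i + dy) (j + dx) = some true) :
    visitTry n i j cnt dy dx (q, v, a) = some (q, v, a) := by
  simp [visitTry, h, hv]

theorem visitTry_push {n i j cnt dy dx : Int}
    {q : List (Int × Int × Int)} {v v' : List (List Bool)} {a a' : List (List Int)}
    (h : ¬(i + dy ≥ n ∨ j + dx ≥ n)) (hv : getCell? v (i + dy) (j + dx) = some false)
    (hsv : setCell? v (i + dy) (j + dx) true = some v')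
    (hsa : setCell? a (i + dy) (j + dx) cnt = some a') :
    visitTry n i j cnt dy dx (q, v, a) = some ((i + dy, j + dx, cnt) :: q, v', a') := by
  simp [visitTry, h, hv, hsv, hsa]

-- composite: in-range, already-visited neighbour is skipped
theorem step_skip {visit₀ : List (List Bool)} {N : Nat} {n i j cnt dy dx : Int}
    {q : List (Int × Int × Int)} {v : List (List Bool)} {a : List (List Int)}
    {V : Nat → Nat → Bool} (hN : (N : Int) = n)
    (hvOk : VisOk visit₀ N v V) (r c : Nat)
    (hij : i + dy = (r : Int)) (hij2 : j + dx = (c : Int))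
    (hr : r < N) (hc : c < N) (hV : V r c = true) (hlen : N ≤ visit₀.length) :
    visitTry n i j cnt dy dx (q, v, a) = some (q, v, a) := by
  have hoob : ¬(i + dy ≥ n ∨ j + dx ≥ n) := by omega
  apply visitTry_vis hoob
  rw [hij, hij2, getCell?_eq v r c (by have := hvOk.1; have := hlen; omega : r < v.length), hvOk.2.2 r c hr hc, hV]

-- composite: in-range, fresh neighbour is pushed (visit marked, arr written)
theorem step_push {arr₀ : List (List Int)} {visit₀ : List (List Bool)} {N : Nat}
    {n i j cnt dy dx : Int}
    {q : List (Int × Int × Int)} {v : List (List Bool)} {a : List (List Int)}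
    {V : Nat → Nat → Bool} (hN : (N : Int) = n)
    (hsh : Shapes arr₀ visit₀ N)
    (hvOk : VisOk visit₀ N v V) (haOk : ArrOk arr₀ N a V) (r c : Nat)
    (hij : i + dy = (r : Int)) (hij2 : j + dx = (c : Int))
    (hr : r < N) (hc : c < N) (hV : V r c = false)
    (hcnt : cnt = ((max r c : Nat) : Int) + 1) :
    ∃ v' a', visitTry n i j cnt dy dx (q, v, a) =
        some (((r : Int), (c : Int), cnt) :: q, v', a') ∧
      VisOk visit₀ N v' (updV V r c) ∧ ArrOk arr₀ N a' (updV V r c) := by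
  have hoob : ¬(i + dy ≥ n ∨ j + dx ≥ n) := by clear hcnt; omega
  obtain ⟨ev, hv'⟩ := visOk_push hvOk r c hr hc hsh.2.1 (hsh.2.2 r hr).2
  obtain ⟨ea, ha'⟩ := arrOk_push haOk r c cnt hr hc hsh.1 (hsh.2.2 r hr).1 hcnt
  refine ⟨_, _, ?_, hv', ha'⟩
  rw [show ((r : Int), (c : Int), cnt) = (i + dy, j + dx, cnt) by rw [hij, hij2]]
  apply visitTry_push hoob
  · rw [hij, hij2, getCell?_eq v r c (by have := hvOk.1; have := hsh.2.1; omega : r < v.length), hvOk.2.2 r c hr hc, hV]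
  · rw [hij, hij2]; exact ev
  · rw [hij, hij2]; exact ea

-- one iteration of the while loop, inner for-loop unrolled
theorem bfsLoop_succ (n : Int) (f : Nat) (i j cnt : Int) (rest : List (Int × Int × Int))
    (v : List (List Bool)) (a : List (List Int)) :
    bfsLoop n (f + 1) ((i, j, cnt) :: rest) v a =
      ((((visitTry n i j (cnt + 1) 1 0 (rest, v, a)).bind
          fun s => visitTry n i j (cnt + 1) 0 1 s).bind
          fun s => visitTry n i j (cnt + 1) 1 1 s).bind
          fun s => bfsLoop n f s.1 s.2.1 s.2.2) := by
  have hR : PySem.List.pyRange 0 3 1 = [0, 1, 2] := by decide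
  have h0 : PySem.List.pyGet? yA 0 = some 1 := by decide
  have h1 : PySem.List.pyGet? yA 1 = some 0 := by decide
  have h2 : PySem.List.pyGet? yA 2 = some 1 := by decide
  have g0 : PySem.List.pyGet? xA 0 = some 0 := by decide
  have g1 : PySem.List.pyGet? xA 1 = some 1 := by decide
  have g2 : PySem.List.pyGet? xA 2 = some 1 := by decide
  conv_lhs => rw [bfsLoop]
  rw [hR]
  simp only [List.foldl, h0, h1, h2, g0, g1, g2]
  rw [show ((some (rest, v, a)).bind fun s => visitTry n i j (cnt + 1) 1 0 s) =
    visitTry n i j (cnt + 1) 1 0 (rest, v, a) from rfl]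
  rcases hX : ((visitTry n i j (cnt + 1) 1 0 (rest, v, a)).bind
      fun s => visitTry n i j (cnt + 1) 0 1 s).bind
      (fun s => visitTry n i j (cnt + 1) 1 1 s) with _ | ⟨q', v', a'⟩ <;> rfl

-- bfsLoop on an empty queue
theorem bfsLoop_nil (n : Int) (f : Nat) (v : List (List Bool)) (a : List (List Int)) :
    bfsLoop n f [] v a = some a := by
  cases f <;> rfl

-- ---- the main invariant ----

def VFull : Nat → Nat → Bool := fun _ _ => true

theorem loop_good (arr₀ : List (List Int)) (visit₀ : List (List Bool)) (n : Int)
    (N : Nat) (hN : (N : Int) = n) (hn : 1 ≤ N)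
    (hsh : Shapes arr₀ visit₀ N) :
    ∀ (f : Nat) (c : Cfg) (v : List (List Bool)) (a : List (List Int)),
      WfC N c → VisOk visit₀ N v (VOf c) → ArrOk arr₀ N a (VOf c) → remOf N c ≤ f →
      ∃ a', bfsLoop n f (queueOf c) v a = some a' ∧
        ArrOk arr₀ N a' VFull := by
  intro f
  induction f with
  | zero =>
    intro c v a hw _ _ hrem
    exfalso
    cases c with
    | diag d =>
      have hNN : N ≤ N * N := Nat.le_mul_of_pos_left N hn
      simp only [WfC] at hw; simp only [remOf] at hrem; omega
    | row k j => simp only [WfC] at hw; simp only [remOf] at hrem; omega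
    | col k i => simp only [WfC] at hw; simp only [remOf] at hrem; omega
  | succ f ih =>
    intro c v a hw hv ha hrem
    cases c with
    | diag d =>
      simp only [WfC] at hw
      rw [show queueOf (.diag d) = ((d : Int), (d : Int), (d : Int) + 1) :: sideS d from rfl]
      by_cases hd2 : d + 1 < N
      · -- three fresh pushes, continue on the diagonal
        obtain ⟨v1, a1, E1, hv1, ha1⟩ :=
          step_push (i := (d : Int)) (j := (d : Int)) (dy := 1) (dx := 0)
            (cnt := (d : Int) + 1 + 1) (q := sideS d) hN hsh hv ha (d + 1) d
            (by push_cast; ring) (by ring) hd2 hw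
            (by simp only [VOf, decide_eq_false_iff_not]; omega)
            (by push_cast; omega)
        obtain ⟨v2, a2, E2, hv2, ha2⟩ :=
          step_push (i := (d : Int)) (j := (d : Int)) (dy := 0) (dx := 1)
            (cnt := (d : Int) + 1 + 1)
            (q := (((d + 1 : Nat) : Int), (d : Int), (d : Int) + 1 + 1) :: sideS d)
            hN hsh hv1 ha1 d (d + 1)
            (by ring) (by push_cast; ring) hw hd2
            (by simp only [updV, VOf]; rw [if_neg (by omega), decide_eq_false_iff_not]; omega)
            (by push_cast; omega)
        obtain ⟨v3, a3, E3, hv3, ha3⟩ :=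
          step_push (i := (d : Int)) (j := (d : Int)) (dy := 1) (dx := 1)
            (cnt := (d : Int) + 1 + 1)
            (q := ((d : Int), ((d + 1 : Nat) : Int), (d : Int) + 1 + 1) ::
                  (((d + 1 : Nat) : Int), (d : Int), (d : Int) + 1 + 1) :: sideS d)
            hN hsh hv2 ha2 (d + 1) (d + 1)
            (by push_cast; ring) (by push_cast; ring) hd2 hd2
            (by simp only [updV, VOf]
                rw [if_neg (by omega), if_neg (by omega), decide_eq_false_iff_not]; omega)
            (by push_cast; omega)
        rw [bfsLoop_succ, E1]
        simp only [Option.bind]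
        rw [E2]
        simp only [Option.bind]
        rw [E3]
        simp only [Option.bind]
        have hq : ((((d + 1 : Nat) : Int), ((d + 1 : Nat) : Int), (d : Int) + 1 + 1) ::
            ((d : Int), ((d + 1 : Nat) : Int), (d : Int) + 1 + 1) ::
            (((d + 1 : Nat) : Int), (d : Int), (d : Int) + 1 + 1) :: sideS d) =
            queueOf (.diag (d + 1)) := by
          simp only [queueOf, sideS, List.cons.injEq, Prod.mk.injEq]
          first
          | trivial
          | (and_intros <;> first | rfl | omega)
        rw [hq]
        exact ih (.diag (d + 1)) v3 a3 (by simp only [WfC]; omega)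
          (visOk_congr hv3 (by
            intro r c hr hc
            simp only [updV, VOf]
            split_ifs with h1 h2 h3 <;>
              first
                | (symm; rw [decide_eq_true_eq]; omega)
                | (rw [decide_eq_decide]; omega)))
          (arrOk_congr ha3 (by
            intro r c hr hc
            simp only [updV, VOf]
            split_ifs with h1 h2 h3 <;>
              first
                | (symm; rw [decide_eq_true_eq]; omega)
                | (rw [decide_eq_decide]; omega)))
          (by simp only [remOf] at hrem ⊢; omega)
      · -- bottom-right corner: all neighbours out of range
        have E1 := visitTry_oob (n := n) (i := (d : Int)) (j := (d : Int))
          (cnt := (d : Int) + 1 + 1) (dy := 1) (dx := 0)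
          (st := (sideS d, v, a)) (by omega)
        have E2 := visitTry_oob (n := n) (i := (d : Int)) (j := (d : Int))
          (cnt := (d : Int) + 1 + 1) (dy := 0) (dx := 1)
          (st := (sideS d, v, a)) (by omega)
        have E3 := visitTry_oob (n := n) (i := (d : Int)) (j := (d : Int))
          (cnt := (d : Int) + 1 + 1) (dy := 1) (dx := 1)
          (st := (sideS d, v, a)) (by omega)
        rw [bfsLoop_succ, E1]
        simp only [Option.bind]
        rw [E2]
        simp only [Option.bind]
        rw [E3]
        simp only [Option.bind]
        by_cases hN1 : N = 1
        · -- n = 1: the queue is now empty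
          have hd0 : d = 0 := by omega
          subst hd0
          rw [show sideS 0 = ([] : List (Int × Int × Int)) from rfl, bfsLoop_nil]
          refine ⟨a, rfl, arrOk_congr ha ?_⟩
          intro r c hr hc
          simp only [VOf, VFull]
          rw [decide_eq_true_eq]; omega
        · -- move to the first row sweep
          obtain ⟨k, hk⟩ : ∃ k, d = k + 1 := ⟨d - 1, by omega⟩
          subst hk
          have hq : sideS (k + 1) = queueOf (.row k (k + 1)) := by
            simp only [queueOf, sideS, List.cons.injEq, Prod.mk.injEq]
            first
            | trivial
            | (and_intros <;> first | rfl | omega)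
          rw [hq]
          exact ih (.row k (k + 1)) v a (by simp only [WfC]; omega)
            (visOk_congr hv (by
              intro r c hr hc
              simp only [VOf]
              rw [decide_eq_decide]; omega))
            (arrOk_congr ha (by
              intro r c hr hc
              simp only [VOf]
              rw [decide_eq_decide]; omega))
            (by
              simp only [remOf] at hrem ⊢
              rw [show N * N = k * k + 4 * k + 4 from by
                rw [show N = k + 2 from by omega]; ring] at hrem
              rw [show 2 * N - k - 1 = k + 3 from by omega,
                show k * (k + 3) = k * k + 3 * k from by ring]
              omega)
    | row k j =>
      obtain ⟨hw1, hw2, hw3⟩ := hw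
      rw [show queueOf (.row k j) = ((k : Int), (j : Int), (j : Int) + 1) ::
        (((k : Int) + 1, (k : Int), (k : Int) + 2) :: sideS k) from rfl]
      have E1 := step_skip (i := (k : Int)) (j := (j : Int)) (dy := 1) (dx := 0)
        (cnt := (j : Int) + 1 + 1)
        (q := ((k : Int) + 1, (k : Int), (k : Int) + 2) :: sideS k) (a := a) hN hv (k + 1) j
        (by push_cast; ring) (by ring) hw1 hw3
        (by simp only [VOf]; rw [decide_eq_true_eq]; omega) hsh.2.1
      by_cases hj2 : j + 1 < N
      · obtain ⟨v2, a2, E2, hv2, ha2⟩ :=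
          step_push (i := (k : Int)) (j := (j : Int)) (dy := 0) (dx := 1)
            (cnt := (j : Int) + 1 + 1)
            (q := ((k : Int) + 1, (k : Int), (k : Int) + 2) :: sideS k)
            hN hsh hv ha k (j + 1) (by ring) (by push_cast; ring)
            (by omega) hj2 (by simp only [VOf, decide_eq_false_iff_not]; omega)
            (by push_cast; omega)
        have E3 := step_skip (i := (k : Int)) (j := (j : Int)) (dy := 1) (dx := 1)
          (cnt := (j : Int) + 1 + 1)
          (q := ((k : Int), ((j + 1 : Nat) : Int), (j : Int) + 1 + 1) ::
                ((k : Int) + 1, (k : Int), (k : Int) + 2) :: sideS k)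
          (a := a2) hN hv2 (k + 1) (j + 1)
          (by push_cast; ring) (by push_cast; ring) hw1 hj2
          (by simp only [updV, VOf]; rw [if_neg (by omega), decide_eq_true_eq]; omega) hsh.2.1
        rw [bfsLoop_succ, E1]
        simp only [Option.bind]
        rw [E2]
        simp only [Option.bind]
        rw [E3]
        simp only [Option.bind]
        have hq : (((k : Int), ((j + 1 : Nat) : Int), (j : Int) + 1 + 1) ::
            ((k : Int) + 1, (k : Int), (k : Int) + 2) :: sideS k) = queueOf (.row k (j + 1)) := by
          simp only [queueOf, List.cons.injEq, Prod.mk.injEq]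
          first
          | trivial
          | (and_intros <;> first | rfl | omega)
        rw [hq]
        exact ih (.row k (j + 1)) v2 a2 (by simp only [WfC]; omega)
          (visOk_congr hv2 (by
            intro r c hr hc
            simp only [updV, VOf]
            split_ifs with h1 <;>
              first
                | (symm; rw [decide_eq_true_eq]; omega)
                | (rw [decide_eq_decide]; omega)))
          (arrOk_congr ha2 (by
            intro r c hr hc
            simp only [updV, VOf]
            split_ifs with h1 <;>
              first
                | (symm; rw [decide_eq_true_eq]; omega)
                | (rw [decide_eq_decide]; omega)))
          (by simp only [remOf] at hrem ⊢; set X := k * (2 * N - k - 1); omega)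
      · -- end of the row: turn into the column sweep
        have E2 := visitTry_oob (n := n) (i := (k : Int)) (j := (j : Int))
          (cnt := (j : Int) + 1 + 1) (dy := 0) (dx := 1)
          (st := (((k : Int) + 1, (k : Int), (k : Int) + 2) :: sideS k, v, a)) (by omega)
        have E3 := visitTry_oob (n := n) (i := (k : Int)) (j := (j : Int))
          (cnt := (j : Int) + 1 + 1) (dy := 1) (dx := 1)
          (st := (((k : Int) + 1, (k : Int), (k : Int) + 2) :: sideS k, v, a)) (by omega)
        rw [bfsLoop_succ, E1]
        simp only [Option.bind]
        rw [E2]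
        simp only [Option.bind]
        rw [E3]
        simp only [Option.bind]
        have hq : (((k : Int) + 1, (k : Int), (k : Int) + 2) :: sideS k) =
            queueOf (.col k (k + 1)) := by
          simp only [queueOf, List.cons.injEq, Prod.mk.injEq]
          first
          | trivial
          | (and_intros <;> first | rfl | omega)
        rw [hq]
        exact ih (.col k (k + 1)) v a (by simp only [WfC]; omega)
          (visOk_congr hv (by
            intro r c hr hc
            simp only [VOf]
            rw [decide_eq_decide]; omega))
          (arrOk_congr ha (by
            intro r c hr hc
            simp only [VOf]
            rw [decide_eq_decide]; omega))
          (by simp only [remOf] at hrem ⊢; set X := k * (2 * N - k - 1); omega)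
    | col k i =>
      obtain ⟨hw1, hw2, hw3⟩ := hw
      rw [show queueOf (.col k i) = ((i : Int), (k : Int), (i : Int) + 1) :: sideS k from rfl]
      by_cases hi2 : i + 1 < N
      · obtain ⟨v1, a1, E1, hv1, ha1⟩ :=
          step_push (i := (i : Int)) (j := (k : Int)) (dy := 1) (dx := 0)
            (cnt := (i : Int) + 1 + 1) (q := sideS k) hN hsh hv ha (i + 1) k
            (by push_cast; ring) (by ring) hi2 (by omega)
            (by simp only [VOf, decide_eq_false_iff_not]; omega)
            (by push_cast; omega)
        have E2 := step_skip (i := (i : Int)) (j := (k : Int)) (dy := 0) (dx := 1)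
          (cnt := (i : Int) + 1 + 1)
          (q := (((i + 1 : Nat) : Int), (k : Int), (i : Int) + 1 + 1) :: sideS k)
          (a := a1) hN hv1 i (k + 1)
          (by ring) (by push_cast; ring) hw3 hw1
          (by simp only [updV, VOf]; rw [if_neg (by omega), decide_eq_true_eq]; omega) hsh.2.1
        have E3 := step_skip (i := (i : Int)) (j := (k : Int)) (dy := 1) (dx := 1)
          (cnt := (i : Int) + 1 + 1)
          (q := (((i + 1 : Nat) : Int), (k : Int), (i : Int) + 1 + 1) :: sideS k)
          (a := a1) hN hv1 (i + 1) (k + 1)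
          (by push_cast; ring) (by push_cast; ring) hi2 hw1
          (by simp only [updV, VOf]; rw [if_neg (by omega), decide_eq_true_eq]; omega) hsh.2.1
        rw [bfsLoop_succ, E1]
        simp only [Option.bind]
        rw [E2]
        simp only [Option.bind]
        rw [E3]
        simp only [Option.bind]
        have hq : ((((i + 1 : Nat) : Int), (k : Int), (i : Int) + 1 + 1) :: sideS k) =
            queueOf (.col k (i + 1)) := by
          simp only [queueOf, List.cons.injEq, Prod.mk.injEq]
          first
          | trivial
          | (and_intros <;> first | rfl | omega)
        rw [hq]
        exact ih (.col k (i + 1)) v1 a1 (by simp only [WfC]; omega)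
          (visOk_congr hv1 (by
            intro r c hr hc
            simp only [updV, VOf]
            split_ifs with h1 <;>
              first
                | (symm; rw [decide_eq_true_eq]; omega)
                | (rw [decide_eq_decide]; omega)))
          (arrOk_congr ha1 (by
            intro r c hr hc
            simp only [updV, VOf]
            split_ifs with h1 <;>
              first
                | (symm; rw [decide_eq_true_eq]; omega)
                | (rw [decide_eq_decide]; omega)))
          (by simp only [remOf] at hrem ⊢; set X := k * (2 * N - k - 1); omega)
      · -- end of the column
        have E1 := visitTry_oob (n := n) (i := (i : Int)) (j := (k : Int))
          (cnt := (i : Int) + 1 + 1) (dy := 1) (dx := 0)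
          (st := (sideS k, v, a)) (by omega)
        have E2 := step_skip (i := (i : Int)) (j := (k : Int)) (dy := 0) (dx := 1)
          (cnt := (i : Int) + 1 + 1) (q := sideS k) (a := a) hN hv i (k + 1)
          (by ring) (by push_cast; ring) hw3 hw1
          (by simp only [VOf]; rw [decide_eq_true_eq]; omega) hsh.2.1
        have E3 := visitTry_oob (n := n) (i := (i : Int)) (j := (k : Int))
          (cnt := (i : Int) + 1 + 1) (dy := 1) (dx := 1)
          (st := (sideS k, v, a)) (by omega)
        rw [bfsLoop_succ, E1]
        simp only [Option.bind]
        rw [E2]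
        simp only [Option.bind]
        rw [E3]
        simp only [Option.bind]
        cases k with
        | zero =>
          rw [show sideS 0 = ([] : List (Int × Int × Int)) from rfl, bfsLoop_nil]
          refine ⟨a, rfl, arrOk_congr ha ?_⟩
          intro r c hr hc
          simp only [VOf, VFull]
          rw [decide_eq_true_eq]; omega
        | succ K =>
          have hq : sideS (K + 1) = queueOf (.row K (K + 1)) := by
            simp only [queueOf, sideS, List.cons.injEq, Prod.mk.injEq]
            first
            | trivial
            | (and_intros <;> first | rfl | omega)
          rw [hq]
          exact ih (.row K (K + 1)) v a (by simp only [WfC]; omega)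
            (visOk_congr hv (by
              intro r c hr hc
              simp only [VOf]
              rw [decide_eq_decide]; omega))
            (arrOk_congr ha (by
              intro r c hr hc
              simp only [VOf]
              rw [decide_eq_decide]; omega))
            (by
              simp only [remOf] at hrem ⊢
              rw [show 2 * N - (K + 1) - 1 = 2 * N - K - 2 from by omega,
                show (K + 1) * (2 * N - K - 2) = K * (2 * N - K - 2) + (2 * N - K - 2) from by
                  ring] at hrem
              rw [show 2 * N - K - 1 = (2 * N - K - 2) + 1 from by omega,
                show K * ((2 * N - K - 2) + 1) = K * (2 * N - K - 2) + K from by ring]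
              omega)

-- ---- evaluating port B's fill loops ----

-- visited-region descriptions for B's row-major fill (origin written up front)
def VRowO (m : Nat) : Nat → Nat → Bool :=
  fun r c => decide (r < m ∨ (r = 0 ∧ c = 0))
def VRCO (m c : Nat) : Nat → Nat → Bool :=
  fun r c' => decide (r < m ∨ (r = m ∧ c' < c) ∨ (r = 0 ∧ c' = 0))

theorem inner_go (arr₀ : List (List Int)) (visit₀ : List (List Bool)) (n : Int)
    (N : Nat) (hN : (N : Int) = n) (hsh : Shapes arr₀ visit₀ N) (m : Nat) (hm : m < N) :
    ∀ (crem c : Nat) (a : List (List Int)) (v : List (List Bool)), c + crem = N →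
      ArrOk arr₀ N a (VRCO m c) → VisOk visit₀ N v (VRCO m c) →
      ∃ a2 v2, (PySem.List.pyRange (c : Int) n 1).foldl
          (fun st2 j => fillCell st2 (m : Int) j) (some (a, v)) = some (a2, v2) ∧
        ArrOk arr₀ N a2 (VRCO m N) ∧ VisOk visit₀ N v2 (VRCO m N) := by
  intro crem
  induction crem with
  | zero =>
    intro c a v hc ha hv
    rw [PySem.List.pyRange_one_eq_nil (by omega : n ≤ (c : Int))]
    exact ⟨a, v, rfl, by rwa [show c = N from by omega] at ha,
      by rwa [show c = N from by omega] at hv⟩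
  | succ crem ihc =>
    intro c a v hc ha hv
    have hcN : c < N := by omega
    rw [PySem.List.pyRange_one_cons (by omega : (c : Int) < n)]
    obtain ⟨ea, ha'⟩ := arrOk_push ha m c (max (m : Int) (c : Int) + 1) hm hcN
      hsh.1 (hsh.2.2 m hm).1 (by push_cast; ring)
    obtain ⟨ev, hv'⟩ := visOk_push hv m c hm hcN hsh.2.1 (hsh.2.2 m hm).2
    simp only [List.foldl_cons, fillCell, Option.bind, ea]
    simp only [ev]
    rw [show ((c : Int) + 1) = (((c + 1 : Nat)) : Int) from by push_cast; ring]
    exact ihc (c + 1) _ _ (by omega)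
      (arrOk_congr ha' (by
        intro r c' hr hc'
        simp only [updV, VRCO]
        split_ifs with h1 <;>
          first
            | (symm; rw [decide_eq_true_eq]; omega)
            | (rw [decide_eq_decide]; omega)))
      (visOk_congr hv' (by
        intro r c' hr hc'
        simp only [updV, VRCO]
        split_ifs with h1 <;>
          first
            | (symm; rw [decide_eq_true_eq]; omega)
            | (rw [decide_eq_decide]; omega)))

theorem outer_go (arr₀ : List (List Int)) (visit₀ : List (List Bool)) (n : Int)
    (N : Nat) (hN : (N : Int) = n) (hsh : Shapes arr₀ visit₀ N) :
    ∀ (mrem m : Nat) (a : List (List Int)) (v : List (List Bool)), m + mrem = N →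
      ArrOk arr₀ N a (VRowO m) → VisOk visit₀ N v (VRowO m) →
      ∃ a1 v1, (PySem.List.pyRange (m : Int) n 1).foldl
          (fun st i => (PySem.List.pyRange 0 n 1).foldl (fun st2 j => fillCell st2 i j) st)
          (some (a, v)) = some (a1, v1) ∧ ArrOk arr₀ N a1 VFull := by
  intro mrem
  induction mrem with
  | zero =>
    intro m a v hm ha _
    rw [PySem.List.pyRange_one_eq_nil (by omega : n ≤ (m : Int))]
    refine ⟨a, v, rfl, arrOk_congr ha ?_⟩
    intro r c hr hc
    simp only [VRowO, VFull]
    rw [decide_eq_true_eq]; omega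
  | succ mrem ihm =>
    intro m a v hm ha hv
    have hmN : m < N := by omega
    rw [PySem.List.pyRange_one_cons (by omega : (m : Int) < n)]
    obtain ⟨a2, v2, E2, ha2, hv2⟩ := inner_go arr₀ visit₀ n N hN hsh m hmN N 0 a v
      (by omega)
      (arrOk_congr ha (by
        intro r c hr hc
        simp only [VRowO, VRCO]
        rw [decide_eq_decide]; omega))
      (visOk_congr hv (by
        intro r c hr hc
        simp only [VRowO, VRCO]
        rw [decide_eq_decide]; omega))
    rw [Nat.cast_zero] at E2
    simp only [List.foldl_cons]
    rw [E2]
    rw [show ((m : Int) + 1) = (((m + 1 : Nat)) : Int) from by push_cast; ring]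
    exact ihm (m + 1) a2 v2 (by omega)
      (arrOk_congr ha2 (by
        intro r c hr hc
        simp only [VRCO, VRowO]
        rw [decide_eq_decide]; omega))
      (visOk_congr hv2 (by
        intro r c hr hc
        simp only [VRCO, VRowO]
        rw [decide_eq_decide]; omega))

-- two arrays fully described by ArrOk with the same visited set are equal
theorem arrOk_unique (arr₀ : List (List Int)) (N : Nat) (x y : List (List Int))
    (hx : ArrOk arr₀ N x VFull) (hy : ArrOk arr₀ N y VFull) : x = y := by
  apply List.ext_getElem?
  intro r
  by_cases hr : r < arr₀.length
  · have hxr : r < x.length := by rw [hx.1]; exact hr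
    have hyr : r < y.length := by rw [hy.1]; exact hr
    rw [List.getElem?_eq_getElem hxr, List.getElem?_eq_getElem hyr]
    congr 1
    rw [← List.getD_eq_getElem x [] hxr, ← List.getD_eq_getElem y [] hyr]
    apply List.ext_getElem?
    intro c
    rw [hx.2.2 r c, hy.2.2 r c]
  · rw [List.getElem?_eq_none (by have := hx.1; omega : x.length ≤ r),
      List.getElem?_eq_none (by have := hy.1; omega : y.length ≤ r)]

-- ===== VERDICT (by name: the statement is the Claim_ definition above) =====
theorem bfs_spec : Claim_equal_bfs := by
  intro arr visit n _ hP
  obtain ⟨hvl, hv00, hal, ha00, hbig⟩ := hP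
  unfold Spec_bfs
  have ev := (setCell?_eq visit 0 0 true hvl hv00)
  have ea := (setCell?_eq arr 0 0 1 hal ha00)
  rw [Nat.cast_zero] at ev ea
  by_cases hn1 : 1 ≤ n
  · -- n ≥ 1: both sides fill the n×n region with max(i,j)+1
    set N := n.toNat with hNdef
    have hN : (N : Int) = n := by omega
    have hn : 1 ≤ N := by omega
    have hsh : Shapes arr visit N := by
      refine ⟨?_, ?_, fun r hr => ⟨?_, ?_⟩⟩
      · by_cases h2 : 2 ≤ n
        · have := (hbig h2).1; omega
        · omega
      · by_cases h2 : 2 ≤ n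
        · have := (hbig h2).2.1; omega
        · omega
      · by_cases h2 : 2 ≤ n
        · have := (hbig h2).2.2.1 r (by omega); omega
        · have : r = 0 := by omega
          subst this; omega
      · by_cases h2 : 2 ≤ n
        · have := ((hbig h2).2.2.2 r (by omega)).1; omega
        · have : r = 0 := by omega
          subst this; omega
    -- initial state: actual visit values, arr unconstrained
    have hvis0 : VisOk visit N visit (fun r c => (visit.getD r []).getD c true) := by
      refine ⟨rfl, fun r => rfl, fun r c hr hc => ?_⟩
      have hcl : c < (visit.getD r []).length := by
        have := (hsh.2.2 r hr).2; omega
      rw [List.getElem?_eq_getElem hcl]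
      show some (visit.getD r [])[c] = some ((visit.getD r []).getD c true)
      rw [List.getD_eq_getElem _ _ hcl]
    have harr0 : ArrOk arr N arr (fun _ _ => false) := by
      refine ⟨rfl, fun r => rfl, fun r c => ?_⟩
      rw [if_neg (by simp)]
    have hfree : ∀ r c : Nat, r < N → c < N → ¬(r = 0 ∧ c = 0) →
        (visit.getD r []).getD c true = false := by
      intro r c hr hc hne
      have h2 : 2 ≤ n := by omega
      exact ((hbig h2).2.2.2 r (by omega)).2 c (by omega)
    obtain ⟨ev', hv1⟩ :=
      visOk_push hvis0 0 0 (by omega) (by omega) hsh.2.1 (hsh.2.2 0 (by omega)).2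
    obtain ⟨ea', ha1⟩ :=
      arrOk_push harr0 0 0 1 (by omega) (by omega) hsh.1 (hsh.2.2 0 (by omega)).1 (by simp)
    rw [Nat.cast_zero] at ev' ea'
    -- A: run the DFS over the region
    have hv1' : VisOk visit N (visit.set 0 ((visit.getD 0 []).set 0 true)) (VOf (.diag 0)) :=
      visOk_congr hv1 (by
        intro r c hr hc
        simp only [updV, VOf]
        split_ifs with h1
        · symm; rw [decide_eq_true_eq]; omega
        · rw [hfree r c hr hc h1]
          symm; rw [decide_eq_false_iff_not]; omega)
    have ha1' : ArrOk arr N (arr.set 0 ((arr.getD 0 []).set 0 1)) (VOf (.diag 0)) :=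
      arrOk_congr ha1 (by
        intro r c hr hc
        simp only [updV, VOf]
        split_ifs with h1 <;>
          first
            | (symm; rw [decide_eq_true_eq]; omega)
            | (symm; rw [decide_eq_false_iff_not]; omega))
    obtain ⟨a', Ea, hA⟩ := loop_good arr visit n N hN hn hsh (N * N + 1) (.diag 0)
      (visit.set 0 ((visit.getD 0 []).set 0 true)) (arr.set 0 ((arr.getD 0 []).set 0 1))
      (by simp only [WfC]; omega) hv1' ha1' (by simp only [remOf]; omega)
    rw [show queueOf (.diag 0) = [((0 : Int), (0 : Int), (1 : Int))] from by
      simp [queueOf, sideS]] at Ea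
    -- B: run the row-major fill over the region
    obtain ⟨a1, v1, Eb, hB⟩ := outer_go arr visit n N hN hsh N 0
      (arr.set 0 ((arr.getD 0 []).set 0 1)) (visit.set 0 ((visit.getD 0 []).set 0 true))
      (by omega)
      (arrOk_congr ha1 (by
        intro r c hr hc
        simp only [updV, VRowO]
        split_ifs with h1 <;>
          first
            | (symm; rw [decide_eq_true_eq]; omega)
            | (symm; rw [decide_eq_false_iff_not]; omega)))
      (visOk_congr hv1 (by
        intro r c hr hc
        simp only [updV, VRowO]
        split_ifs with h1
        · symm; rw [decide_eq_true_eq]; omega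
        · rw [hfree r c hr hc h1]
          symm; rw [decide_eq_false_iff_not]; omega))
    rw [Nat.cast_zero] at Eb
    unfold bfs bfs_alt
    rw [ev]
    simp only []
    rw [ea]
    simp only []
    rw [Ea, Eb]
    simp only []
    rw [arrOk_unique arr N a' a1 hA hB]
  · -- n ≤ 0: A pops (0,0) and stops; B's fill loops are empty
    unfold bfs bfs_alt
    rw [ev]
    simp only []
    rw [ea]
    simp only []
    rw [show n.toNat * n.toNat + 1 = 0 + 1 from by
      have h0 : n.toNat = 0 := by omega
      rw [h0], bfsLoop_succ]
    rw [visitTry_oob (by omega : (0 : Int) + 1 ≥ n ∨ (0 : Int) + 0 ≥ n)]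
    simp only [Option.bind]
    rw [visitTry_oob (by omega : (0 : Int) + 0 ≥ n ∨ (0 : Int) + 1 ≥ n)]
    simp only [Option.bind]
    rw [visitTry_oob (by omega : (0 : Int) + 1 ≥ n ∨ (0 : Int) + 1 ≥ n)]
    simp only [Option.bind]
    rw [bfsLoop_nil]
    rw [PySem.List.pyRange_one_eq_nil (by omega : n ≤ (0 : Int)), List.foldl_nil]
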